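/- GENERATED by mk_final_copies.py from the proof of the farm's unit `inverse_mdct.10` (farm:inverse_mdct.10.1: Proof.lean) as the
   re-elaboration sweep compiled it — do not edit. -/
import Asan.CheckWalk
import Vorbis.Spec.MdctUse
import Vorbis.Spec.Units.inverse_mdct_10
open X86 X86.User Asan Vorbis Vorbis.Spec

set_option maxRecDepth 4000
set_option maxHeartbeats 16000000

/-- Segment 10 of `inverse_mdct` (`cut22` 0x109d72 … `cut23` 0x109f5f, lines 2913–2927: the step-8 body, first half): from the
loop invariant `AtS8Body` to `AtS8Mid`. Sixteen check sites (`e[4..7]` in the temp block, `B[4..7]` in the table, `d0[0..1]`,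
`d1[2..3]`, `d2[0..1]`, `d3[2..3]` in the sample buffer), each closed by `LiveBytes.accSmall`. The walk is cut at the return label of
every check call: the check's fast path switches the tracking of the vector registers on (`w_zmm`), whose term doubles with every SSE
step, so it is cleared at each cut, with the walker's hypotheses the rest of the walk does not need (every `u_omega` pays for
them). `ShadowUntouched` is carried from cut to cut (`hun80 … hun95`). The exit is `inverse_mdct.Body.carry` over the segment's
footprint; the frame slots are transported over the same footprint with small stack windows (`hs2`). -/
theorem Vorbis.Spec.Worked.inverse_mdct_10_ok : Vorbis.Spec.inverse_mdct_10.Statement := by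
  intro Lay hLay μ hμ u₀ hcode hload4 hstore4 others frames len A stored room ysz k c ue ret t v hat
  obtain ⟨hrip, hloop, hlt⟩ := hat
  have hb := hloop.body
  have hp := hb.pre
  -- 1. the entry state's facts
  have he := hb.entry
  v_entry he
  -- 2. the present state under the walker's names
  have hrsp := hb.rsp
  have hrbp := hb.rbp
  have w_eq : Mem.EqOn Vorbis.L.textLo Vorbis.L.textHi u₀.mem v.mem := hb.code
  have hdf : v.flags .df = false := (show abiInv _ from hb.abi).1
  have hmx : v.mxcsr &&& 0x1F80 = 0x1F80 := (show abiInv _ from hb.abi).2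
  have hsse := Vorbis.sseOK_of_abiInv hb.abi
  -- 3. the slot the segment loads
  have sd0 := hloop.d0Slot
  -- the arithmetic
  have hf := hp.isBlocksize.facts
  have ht16 : 16 * t + 16 ≤ inverse_mdct.n ue := by omega
  have hrbx := hloop.rbx
  have hr12 := hloop.r12
  have hr13 := hloop.r13
  have hr14 := hloop.r14
  have hr15 := hloop.r15
  have hr := hp.tmp_range
  have hnle := hp.n_le
  have hbufin := hp.ok.inside _ hp.buf_blk
  have hbufS := hp.offStack _ hp.buf_blk
  have hBin := hp.ok.inside _ hp.tabB_blk
  have h1 := hp.ado.ok.AR1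
  have h1x := hp.ado.ok.AR1x
  have h2 := hp.ado.ok.AR2
  have hat := hp.arenaText
  simp only [vblock, voff] at hbufin hbufS hBin
  have hbufT : 0x119d40 ≤ inverse_mdct.buf ue := by
    have hl : LiveBytes others frames (inverse_mdct.buf ue) (4 * bsize ue.mem (inverse_mdct.f ue) 1) :=
      LiveBytes.of_inLive (hp.live _ hp.buf_blk)
    exact (hl.where_ hp.shadow.inv hp.shadow.offText (by omega) (by omega)).1
  -- the three live ranges of the check sites
  have hVL : LiveBytes (A.newTempObj (2 * inverse_mdct.n ue) :: others) frames (inverse_mdct.tmp A ue)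
      (2 * inverse_mdct.n ue) := inverse_mdct.tmp_live A ue
  have hBL : LiveBytes (A.newTempObj (2 * inverse_mdct.n ue) :: others) frames (inverse_mdct.tabB ue)
      (2 * inverse_mdct.n ue) :=
    LiveBytes.of_block (hp.blkLive _ _ hp.tabB_blk) (Nat.le_refl _) (Nat.le_refl _)
  have hUL : LiveBytes (A.newTempObj (2 * inverse_mdct.n ue) :: others) frames (inverse_mdct.buf ue)
      (4 * inverse_mdct.n ue) :=
    LiveBytes.of_block (hp.blkLive _ _ hp.buf_blk) (Nat.le_refl _) (by simp only []; omega)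
  have hsh := hb.shadow
  -- the frame slots, as facts about the present memory
  have sret := hb.retSlot
  have srbp := hb.rbpSlot
  have sr15 := hb.r15Slot
  have sr14 := hb.r14Slot
  have sr13 := hb.r13Slot
  have sr12 := hb.r12Slot
  have srbx := hb.rbxSlot
  have sf := hb.fSlot
  have sbt := hb.btSlot
  have ssave := hb.saveSlot
  have sv := hb.vSlot
  -- to the return of the check at 0x109d76 (`ret80`)
  u_walk hcode [hμ.vendor] until [Vorbis.L.inverse_mdct.ret80] span [Vorbis.L.textLo, Vorbis.L.textHi] side (v_side)
  case check_109d76 =>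
    have hun : ShadowUntouched v.mem s_109d76.mem := by v_untouched
    exact hVL.accSmall hsh hun _ 4 (by decide) (by u_omega) (by u_omega)
  have hun80 : ShadowUntouched v.mem s_109d76r.mem := by v_untouched
  unfold Asan.ShadowUntouched at hun80
  rw [w_mem] at hun80
  -- what the walk no longer needs (the context is what every `u_omega` pays for)
  try clear w_zmm
  try clear w_has_109d76
  -- to the return of the check at 0x109d8a (`ret81`)
  u_walk hcode [hμ.vendor] until [Vorbis.L.inverse_mdct.ret81] span [Vorbis.L.textLo, Vorbis.L.textHi] side (v_side)
  case check_109d8a =>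
    have hun : ShadowUntouched v.mem s_109d8a.mem := by v_untouched
    exact hBL.accSmall hsh hun _ 4 (by decide) (by u_omega) (by u_omega)
  have hun81 : ShadowUntouched v.mem s_109d8ar.mem := by v_untouched
  unfold Asan.ShadowUntouched at hun81
  rw [w_mem] at hun81
  -- what the walk no longer needs (the context is what every `u_omega` pays for)
  try clear w_zmm
  try clear x_109d7b
  try clear w_has_109d80
  try clear w_has_109d8a
  try clear w_acc_109d76
  try clear w_df_109d76
  -- to the return of the check at 0x109dad (`ret82`)
  u_walk hcode [hμ.vendor] until [Vorbis.L.inverse_mdct.ret82] span [Vorbis.L.textLo, Vorbis.L.textHi] side (v_side)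
  case check_109dad =>
    have hun : ShadowUntouched v.mem s_109dad.mem := by v_untouched
    exact hVL.accSmall hsh hun _ 4 (by decide) (by u_omega) (by u_omega)
  have hun82 : ShadowUntouched v.mem s_109dadr.mem := by v_untouched
  unfold Asan.ShadowUntouched at hun82
  rw [w_mem] at hun82
  -- what the walk no longer needs (the context is what every `u_omega` pays for)
  try clear w_zmm
  try clear x_109d8f
  try clear x_109d96
  try clear w_has_109d9b
  try clear x_109da0
  try clear w_has_109da4
  try clear w_has_109dad
  try clear w_acc_109d8a
  try clear w_df_109d8a
  -- to the return of the check at 0x109dc1 (`ret83`)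
  u_walk hcode [hμ.vendor] until [Vorbis.L.inverse_mdct.ret83] span [Vorbis.L.textLo, Vorbis.L.textHi] side (v_side)
  case check_109dc1 =>
    have hun : ShadowUntouched v.mem s_109dc1.mem := by v_untouched
    exact hBL.accSmall hsh hun _ 4 (by decide) (by u_omega) (by u_omega)
  have hun83 : ShadowUntouched v.mem s_109dc1r.mem := by v_untouched
  unfold Asan.ShadowUntouched at hun83
  rw [w_mem] at hun83
  -- what the walk no longer needs (the context is what every `u_omega` pays for)
  try clear w_zmm
  try clear x_109db2
  try clear w_has_109db7
  try clear w_has_109dc1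
  try clear w_acc_109dad
  try clear w_df_109dad
  -- to the return of the check at 0x109e0d (`ret84`)
  u_walk hcode [hμ.vendor] until [Vorbis.L.inverse_mdct.ret84] span [Vorbis.L.textLo, Vorbis.L.textHi] side (v_side)
  case check_109e0d =>
    have hun : ShadowUntouched v.mem s_109e0d.mem := by v_untouched
    exact hUL.accSmall hsh hun _ 4 (by decide) (by u_omega) (by u_omega)
  have hun84 : ShadowUntouched v.mem s_109e0dr.mem := by v_untouched
  unfold Asan.ShadowUntouched at hun84
  rw [w_mem] at hun84
  -- what the walk no longer needs (the context is what every `u_omega` pays for)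
  try clear w_zmm
  try clear x_109dc6
  try clear x_109dcd
  try clear x_109dd2
  try clear x_109dd5
  try clear x_109dd9
  try clear x_109dde
  try clear w_has_109de2
  try clear x_109de7
  try clear x_109dec
  try clear x_109df3
  try clear x_109df7
  try clear x_109dfc
  try clear x_109e00
  try clear w_has_109e04
  try clear w_has_109e0d
  try clear w_acc_109dc1
  try clear w_df_109dc1
  try clear hmx_109da0
  try clear mx_109da0
  try clear hmx_109dd5
  try clear mx_109dd5
  try clear hmx_109dde
  try clear mx_109dde
  try clear hmx_109df3
  try clear mx_109df3
  try clear hmx_109dfc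
  try clear mx_109dfc
  -- to the return of the check at 0x109e2f (`ret85`)
  u_walk hcode [hμ.vendor] until [Vorbis.L.inverse_mdct.ret85] span [Vorbis.L.textLo, Vorbis.L.textHi] side (v_side)
  case check_109e2f =>
    have hun : ShadowUntouched v.mem s_109e2f.mem := by v_untouched
    exact hUL.accSmall hsh hun _ 4 (by decide) (by u_omega) (by u_omega)
  have hun85 : ShadowUntouched v.mem s_109e2fr.mem := by v_untouched
  unfold Asan.ShadowUntouched at hun85
  rw [w_mem] at hun85
  -- what the walk no longer needs (the context is what every `u_omega` pays for)
  try clear w_zmm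
  try clear x_109e16
  try clear x_109e1f
  try clear w_has_109e26
  try clear w_has_109e2f
  try clear w_df_109e0d
  -- to the return of the check at 0x109e42 (`ret86`)
  u_walk hcode [hμ.vendor] until [Vorbis.L.inverse_mdct.ret86] span [Vorbis.L.textLo, Vorbis.L.textHi] side (v_side)
  case check_109e42 =>
    have hun : ShadowUntouched v.mem s_109e42.mem := by v_untouched
    exact hUL.accSmall hsh hun _ 4 (by decide) (by u_omega) (by u_omega)
  have hun86 : ShadowUntouched v.mem s_109e42r.mem := by v_untouched
  unfold Asan.ShadowUntouched at hun86
  rw [w_mem] at hun86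
  -- what the walk no longer needs (the context is what every `u_omega` pays for)
  try clear w_zmm
  try clear x_109e34
  try clear w_has_109e42
  try clear w_df_109e2f
  -- to the return of the check at 0x109e55 (`ret87`)
  u_walk hcode [hμ.vendor] until [Vorbis.L.inverse_mdct.ret87] span [Vorbis.L.textLo, Vorbis.L.textHi] side (v_side)
  case check_109e55 =>
    have hun : ShadowUntouched v.mem s_109e55.mem := by v_untouched
    exact hUL.accSmall hsh hun _ 4 (by decide) (by u_omega) (by u_omega)
  have hun87 : ShadowUntouched v.mem s_109e55r.mem := by v_untouched
  unfold Asan.ShadowUntouched at hun87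
  rw [w_mem] at hun87
  -- what the walk no longer needs (the context is what every `u_omega` pays for)
  try clear w_zmm
  try clear x_109e47
  try clear w_has_109e55
  try clear w_df_109e42
  -- to the return of the check at 0x109e69 (`ret88`)
  u_walk hcode [hμ.vendor] until [Vorbis.L.inverse_mdct.ret88] span [Vorbis.L.textLo, Vorbis.L.textHi] side (v_side)
  case check_109e69 =>
    have hun : ShadowUntouched v.mem s_109e69.mem := by v_untouched
    exact hVL.accSmall hsh hun _ 4 (by decide) (by u_omega) (by u_omega)
  have hun88 : ShadowUntouched v.mem s_109e69r.mem := by v_untouched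
  unfold Asan.ShadowUntouched at hun88
  rw [w_mem] at hun88
  -- what the walk no longer needs (the context is what every `u_omega` pays for)
  try clear w_zmm
  try clear x_109e5a
  try clear w_has_109e69
  try clear w_df_109e55
  -- to the return of the check at 0x109e7d (`ret89`)
  u_walk hcode [hμ.vendor] until [Vorbis.L.inverse_mdct.ret89] span [Vorbis.L.textLo, Vorbis.L.textHi] side (v_side)
  case check_109e7d =>
    have hun : ShadowUntouched v.mem s_109e7d.mem := by v_untouched
    exact hBL.accSmall hsh hun _ 4 (by decide) (by u_omega) (by u_omega)
  have hun89 : ShadowUntouched v.mem s_109e7dr.mem := by v_untouched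
  unfold Asan.ShadowUntouched at hun89
  rw [w_mem] at hun89
  -- what the walk no longer needs (the context is what every `u_omega` pays for)
  try clear w_zmm
  try clear x_109e6e
  try clear w_has_109e73
  try clear w_has_109e7d
  try clear w_acc_109e69
  try clear w_df_109e69
  -- to the return of the check at 0x109ea0 (`ret90`)
  u_walk hcode [hμ.vendor] until [Vorbis.L.inverse_mdct.ret90] span [Vorbis.L.textLo, Vorbis.L.textHi] side (v_side)
  case check_109ea0 =>
    have hun : ShadowUntouched v.mem s_109ea0.mem := by v_untouched
    exact hVL.accSmall hsh hun _ 4 (by decide) (by u_omega) (by u_omega)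
  have hun90 : ShadowUntouched v.mem s_109ea0r.mem := by v_untouched
  unfold Asan.ShadowUntouched at hun90
  rw [w_mem] at hun90
  -- what the walk no longer needs (the context is what every `u_omega` pays for)
  try clear w_zmm
  try clear x_109e82
  try clear x_109e89
  try clear w_has_109e8e
  try clear x_109e93
  try clear w_has_109e97
  try clear w_has_109ea0
  try clear w_acc_109e7d
  try clear w_df_109e7d
  try clear hmx_109e00
  try clear mx_109e00
  -- to the return of the check at 0x109eb4 (`ret91`)
  u_walk hcode [hμ.vendor] until [Vorbis.L.inverse_mdct.ret91] span [Vorbis.L.textLo, Vorbis.L.textHi] side (v_side)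
  case check_109eb4 =>
    have hun : ShadowUntouched v.mem s_109eb4.mem := by v_untouched
    exact hBL.accSmall hsh hun _ 4 (by decide) (by u_omega) (by u_omega)
  have hun91 : ShadowUntouched v.mem s_109eb4r.mem := by v_untouched
  unfold Asan.ShadowUntouched at hun91
  rw [w_mem] at hun91
  -- what the walk no longer needs (the context is what every `u_omega` pays for)
  try clear w_zmm
  try clear x_109ea5
  try clear w_has_109eaa
  try clear w_has_109eb4
  try clear w_acc_109ea0
  try clear w_df_109ea0
  -- to the return of the check at 0x109f04 (`ret92`)
  u_walk hcode [hμ.vendor] until [Vorbis.L.inverse_mdct.ret92] span [Vorbis.L.textLo, Vorbis.L.textHi] side (v_side)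
  case check_109f04 =>
    have hun : ShadowUntouched v.mem s_109f04.mem := by v_untouched
    exact hUL.accSmall hsh hun _ 4 (by decide) (by u_omega) (by u_omega)
  have hun92 : ShadowUntouched v.mem s_109f04r.mem := by v_untouched
  unfold Asan.ShadowUntouched at hun92
  rw [w_mem] at hun92
  -- what the walk no longer needs (the context is what every `u_omega` pays for)
  try clear w_zmm
  try clear x_109eb9
  try clear x_109ec0
  try clear x_109ec5
  try clear x_109ec8
  try clear x_109ecc
  try clear x_109ed1
  try clear w_has_109ed5
  try clear x_109eda
  try clear x_109edf
  try clear x_109ee6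
  try clear x_109eea
  try clear x_109eef
  try clear x_109ef3
  try clear w_has_109ef7
  try clear w_has_109f04
  try clear w_acc_109eb4
  try clear w_df_109eb4
  try clear hmx_109e93
  try clear mx_109e93
  try clear hmx_109ec8
  try clear mx_109ec8
  try clear hmx_109ed1
  try clear mx_109ed1
  try clear hmx_109ee6
  try clear mx_109ee6
  try clear hmx_109eef
  try clear mx_109eef
  -- to the return of the check at 0x109f27 (`ret93`)
  u_walk hcode [hμ.vendor] until [Vorbis.L.inverse_mdct.ret93] span [Vorbis.L.textLo, Vorbis.L.textHi] side (v_side)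
  case check_109f27 =>
    have hun : ShadowUntouched v.mem s_109f27.mem := by v_untouched
    exact hUL.accSmall hsh hun _ 4 (by decide) (by u_omega) (by u_omega)
  have hun93 : ShadowUntouched v.mem s_109f27r.mem := by v_untouched
  unfold Asan.ShadowUntouched at hun93
  rw [w_mem] at hun93
  -- what the walk no longer needs (the context is what every `u_omega` pays for)
  try clear w_zmm
  try clear x_109f0d
  try clear x_109f17
  try clear w_has_109f1e
  try clear w_has_109f27
  try clear w_df_109f04
  -- to the return of the check at 0x109f3b (`ret94`)
  u_walk hcode [hμ.vendor] until [Vorbis.L.inverse_mdct.ret94] span [Vorbis.L.textLo, Vorbis.L.textHi] side (v_side)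
  case check_109f3b =>
    have hun : ShadowUntouched v.mem s_109f3b.mem := by v_untouched
    exact hUL.accSmall hsh hun _ 4 (by decide) (by u_omega) (by u_omega)
  have hun94 : ShadowUntouched v.mem s_109f3br.mem := by v_untouched
  unfold Asan.ShadowUntouched at hun94
  rw [w_mem] at hun94
  -- what the walk no longer needs (the context is what every `u_omega` pays for)
  try clear w_zmm
  try clear x_109f2c
  try clear w_has_109f3b
  try clear w_df_109f27
  -- to the return of the check at 0x109f4f (`ret95`)
  u_walk hcode [hμ.vendor] until [Vorbis.L.inverse_mdct.ret95] span [Vorbis.L.textLo, Vorbis.L.textHi] side (v_side)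
  case check_109f4f =>
    have hun : ShadowUntouched v.mem s_109f4f.mem := by v_untouched
    exact hUL.accSmall hsh hun _ 4 (by decide) (by u_omega) (by u_omega)
  have hun95 : ShadowUntouched v.mem s_109f4fr.mem := by v_untouched
  unfold Asan.ShadowUntouched at hun95
  rw [w_mem] at hun95
  -- what the walk no longer needs (the context is what every `u_omega` pays for)
  try clear w_zmm
  try clear x_109f40
  try clear w_has_109f4f
  try clear w_df_109f3b
  u_walk hcode [hμ.vendor] until [Vorbis.L.inverse_mdct.cut23] span [Vorbis.L.textLo, Vorbis.L.textHi] side (v_side)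
  -- the exit at cut23 (0x109f5f, line 2929): first the footprint of THIS segment with the stack windows as small as they are
  -- (the return addresses of the check calls at rsp − 192, the float scratch at rsp − 96 … rsp − 68): the frame slots lie outside
  have hs2 : Mem.SameExcept
      [⟨(ue.reg .rsp).toNat - 192, (ue.reg .rsp).toNat - 184⟩,
       ⟨(ue.reg .rsp).toNat - 96, (ue.reg .rsp).toNat - 68⟩,
       ⟨inverse_mdct.buf ue, inverse_mdct.buf ue + 4 * inverse_mdct.n ue⟩] v.mem s_109f59.mem := by
    u_same
  -- the footprint in the form the frame rule `Body.carry` takes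
  have hs : Mem.SameExcept
      [⟨(ue.reg .rsp).toNat - 368, (ue.reg .rsp).toNat⟩,
       ⟨inverse_mdct.buf ue, inverse_mdct.buf ue + 4 * inverse_mdct.n ue⟩,
       ⟨inverse_mdct.tmp A ue, inverse_mdct.tmp A ue + 2 * inverse_mdct.n ue⟩] v.mem s_109f59.mem := by
    u_same
  have habi : abiInv s_109f59 := by
    v_inv
  clear w_mem
  -- the frame slots lie outside the three windows of `hs2`
  have hoff0_t_ret : ∀ w ∈ ([⟨(ue.reg .rsp).toNat - 192, (ue.reg .rsp).toNat - 184⟩,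
      ⟨(ue.reg .rsp).toNat - 96, (ue.reg .rsp).toNat - 68⟩,
      ⟨inverse_mdct.buf ue, inverse_mdct.buf ue + 4 * inverse_mdct.n ue⟩] : List Span),
      (ue.reg .rsp).toNat + 8 ≤ w.lo ∨ w.hi ≤ (ue.reg .rsp).toNat := by
    intro w hw
    simp only [List.mem_cons, List.mem_nil_iff, or_false] at hw
    rcases hw with rfl | rfl | rfl
    · simp only []
      u_omega
    · simp only []
      u_omega
    · simp only []
      u_omega
  have hoff8_t_rbp : ∀ w ∈ ([⟨(ue.reg .rsp).toNat - 192, (ue.reg .rsp).toNat - 184⟩,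
      ⟨(ue.reg .rsp).toNat - 96, (ue.reg .rsp).toNat - 68⟩,
      ⟨inverse_mdct.buf ue, inverse_mdct.buf ue + 4 * inverse_mdct.n ue⟩] : List Span),
      (ue.reg .rsp - 8).toNat + 8 ≤ w.lo ∨ w.hi ≤ (ue.reg .rsp - 8).toNat := by
    intro w hw
    simp only [List.mem_cons, List.mem_nil_iff, or_false] at hw
    rcases hw with rfl | rfl | rfl
    · simp only []
      u_omega
    · simp only []
      u_omega
    · simp only []
      u_omega
  have hoff8_t_r15 : ∀ w ∈ ([⟨(ue.reg .rsp).toNat - 192, (ue.reg .rsp).toNat - 184⟩,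
      ⟨(ue.reg .rsp).toNat - 96, (ue.reg .rsp).toNat - 68⟩,
      ⟨inverse_mdct.buf ue, inverse_mdct.buf ue + 4 * inverse_mdct.n ue⟩] : List Span),
      (ue.reg .rsp - 16).toNat + 8 ≤ w.lo ∨ w.hi ≤ (ue.reg .rsp - 16).toNat := by
    intro w hw
    simp only [List.mem_cons, List.mem_nil_iff, or_false] at hw
    rcases hw with rfl | rfl | rfl
    · simp only []
      u_omega
    · simp only []
      u_omega
    · simp only []
      u_omega
  have hoff8_t_r14 : ∀ w ∈ ([⟨(ue.reg .rsp).toNat - 192, (ue.reg .rsp).toNat - 184⟩,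
      ⟨(ue.reg .rsp).toNat - 96, (ue.reg .rsp).toNat - 68⟩,
      ⟨inverse_mdct.buf ue, inverse_mdct.buf ue + 4 * inverse_mdct.n ue⟩] : List Span),
      (ue.reg .rsp - 24).toNat + 8 ≤ w.lo ∨ w.hi ≤ (ue.reg .rsp - 24).toNat := by
    intro w hw
    simp only [List.mem_cons, List.mem_nil_iff, or_false] at hw
    rcases hw with rfl | rfl | rfl
    · simp only []
      u_omega
    · simp only []
      u_omega
    · simp only []
      u_omega
  have hoff8_t_r13 : ∀ w ∈ ([⟨(ue.reg .rsp).toNat - 192, (ue.reg .rsp).toNat - 184⟩,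
      ⟨(ue.reg .rsp).toNat - 96, (ue.reg .rsp).toNat - 68⟩,
      ⟨inverse_mdct.buf ue, inverse_mdct.buf ue + 4 * inverse_mdct.n ue⟩] : List Span),
      (ue.reg .rsp - 32).toNat + 8 ≤ w.lo ∨ w.hi ≤ (ue.reg .rsp - 32).toNat := by
    intro w hw
    simp only [List.mem_cons, List.mem_nil_iff, or_false] at hw
    rcases hw with rfl | rfl | rfl
    · simp only []
      u_omega
    · simp only []
      u_omega
    · simp only []
      u_omega
  have hoff8_t_r12 : ∀ w ∈ ([⟨(ue.reg .rsp).toNat - 192, (ue.reg .rsp).toNat - 184⟩,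
      ⟨(ue.reg .rsp).toNat - 96, (ue.reg .rsp).toNat - 68⟩,
      ⟨inverse_mdct.buf ue, inverse_mdct.buf ue + 4 * inverse_mdct.n ue⟩] : List Span),
      (ue.reg .rsp - 40).toNat + 8 ≤ w.lo ∨ w.hi ≤ (ue.reg .rsp - 40).toNat := by
    intro w hw
    simp only [List.mem_cons, List.mem_nil_iff, or_false] at hw
    rcases hw with rfl | rfl | rfl
    · simp only []
      u_omega
    · simp only []
      u_omega
    · simp only []
      u_omega
  have hoff8_t_rbx : ∀ w ∈ ([⟨(ue.reg .rsp).toNat - 192, (ue.reg .rsp).toNat - 184⟩,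
      ⟨(ue.reg .rsp).toNat - 96, (ue.reg .rsp).toNat - 68⟩,
      ⟨inverse_mdct.buf ue, inverse_mdct.buf ue + 4 * inverse_mdct.n ue⟩] : List Span),
      (ue.reg .rsp - 48).toNat + 8 ≤ w.lo ∨ w.hi ≤ (ue.reg .rsp - 48).toNat := by
    intro w hw
    simp only [List.mem_cons, List.mem_nil_iff, or_false] at hw
    rcases hw with rfl | rfl | rfl
    · simp only []
      u_omega
    · simp only []
      u_omega
    · simp only []
      u_omega
  have hoff8_t_f : ∀ w ∈ ([⟨(ue.reg .rsp).toNat - 192, (ue.reg .rsp).toNat - 184⟩,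
      ⟨(ue.reg .rsp).toNat - 96, (ue.reg .rsp).toNat - 68⟩,
      ⟨inverse_mdct.buf ue, inverse_mdct.buf ue + 4 * inverse_mdct.n ue⟩] : List Span),
      (ue.reg .rsp - 128).toNat + 8 ≤ w.lo ∨ w.hi ≤ (ue.reg .rsp - 128).toNat := by
    intro w hw
    simp only [List.mem_cons, List.mem_nil_iff, or_false] at hw
    rcases hw with rfl | rfl | rfl
    · simp only []
      u_omega
    · simp only []
      u_omega
    · simp only []
      u_omega
  have hoff4_t_bt : ∀ w ∈ ([⟨(ue.reg .rsp).toNat - 192, (ue.reg .rsp).toNat - 184⟩,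
      ⟨(ue.reg .rsp).toNat - 96, (ue.reg .rsp).toNat - 68⟩,
      ⟨inverse_mdct.buf ue, inverse_mdct.buf ue + 4 * inverse_mdct.n ue⟩] : List Span),
      (ue.reg .rsp - 132).toNat + 4 ≤ w.lo ∨ w.hi ≤ (ue.reg .rsp - 132).toNat := by
    intro w hw
    simp only [List.mem_cons, List.mem_nil_iff, or_false] at hw
    rcases hw with rfl | rfl | rfl
    · simp only []
      u_omega
    · simp only []
      u_omega
    · simp only []
      u_omega
  have hoff4_t_save : ∀ w ∈ ([⟨(ue.reg .rsp).toNat - 192, (ue.reg .rsp).toNat - 184⟩,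
      ⟨(ue.reg .rsp).toNat - 96, (ue.reg .rsp).toNat - 68⟩,
      ⟨inverse_mdct.buf ue, inverse_mdct.buf ue + 4 * inverse_mdct.n ue⟩] : List Span),
      (ue.reg .rsp - 152).toNat + 4 ≤ w.lo ∨ w.hi ≤ (ue.reg .rsp - 152).toNat := by
    intro w hw
    simp only [List.mem_cons, List.mem_nil_iff, or_false] at hw
    rcases hw with rfl | rfl | rfl
    · simp only []
      u_omega
    · simp only []
      u_omega
    · simp only []
      u_omega
  have hoff8_t_v : ∀ w ∈ ([⟨(ue.reg .rsp).toNat - 192, (ue.reg .rsp).toNat - 184⟩,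
      ⟨(ue.reg .rsp).toNat - 96, (ue.reg .rsp).toNat - 68⟩,
      ⟨inverse_mdct.buf ue, inverse_mdct.buf ue + 4 * inverse_mdct.n ue⟩] : List Span),
      (ue.reg .rsp - 112).toNat + 8 ≤ w.lo ∨ w.hi ≤ (ue.reg .rsp - 112).toNat := by
    intro w hw
    simp only [List.mem_cons, List.mem_nil_iff, or_false] at hw
    rcases hw with rfl | rfl | rfl
    · simp only []
      u_omega
    · simp only []
      u_omega
    · simp only []
      u_omega
  have hoff8_e_d0 : ∀ w ∈ ([⟨(ue.reg .rsp).toNat - 192, (ue.reg .rsp).toNat - 184⟩,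
      ⟨(ue.reg .rsp).toNat - 96, (ue.reg .rsp).toNat - 68⟩,
      ⟨inverse_mdct.buf ue, inverse_mdct.buf ue + 4 * inverse_mdct.n ue⟩] : List Span),
      (ue.reg .rsp - 64).toNat + 8 ≤ w.lo ∨ w.hi ≤ (ue.reg .rsp - 64).toNat := by
    intro w hw
    simp only [List.mem_cons, List.mem_nil_iff, or_false] at hw
    rcases hw with rfl | rfl | rfl
    · simp only []
      u_omega
    · simp only []
      u_omega
    · simp only []
      u_omega
  -- the frame slots at the exit, transported over `hs2`
  have t_ret : UInt64.ofNat (s_109f59.mem.readLE (ue.reg .rsp) 8) = ret := by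
    rw [hs2.readLE (ue.reg .rsp) 8 (by u_omega) hoff0_t_ret]
    exact sret
  have t_rbp : UInt64.ofNat (s_109f59.mem.readLE (ue.reg .rsp - 8) 8) = ue.reg .rbp := by
    rw [hs2.readLE (ue.reg .rsp - 8) 8 (by u_omega) hoff8_t_rbp]
    exact srbp
  have t_r15 : UInt64.ofNat (s_109f59.mem.readLE (ue.reg .rsp - 16) 8) = ue.reg .r15 := by
    rw [hs2.readLE (ue.reg .rsp - 16) 8 (by u_omega) hoff8_t_r15]
    exact sr15
  have t_r14 : UInt64.ofNat (s_109f59.mem.readLE (ue.reg .rsp - 24) 8) = ue.reg .r14 := by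
    rw [hs2.readLE (ue.reg .rsp - 24) 8 (by u_omega) hoff8_t_r14]
    exact sr14
  have t_r13 : UInt64.ofNat (s_109f59.mem.readLE (ue.reg .rsp - 32) 8) = ue.reg .r13 := by
    rw [hs2.readLE (ue.reg .rsp - 32) 8 (by u_omega) hoff8_t_r13]
    exact sr13
  have t_r12 : UInt64.ofNat (s_109f59.mem.readLE (ue.reg .rsp - 40) 8) = ue.reg .r12 := by
    rw [hs2.readLE (ue.reg .rsp - 40) 8 (by u_omega) hoff8_t_r12]
    exact sr12
  have t_rbx : UInt64.ofNat (s_109f59.mem.readLE (ue.reg .rsp - 48) 8) = ue.reg .rbx := by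
    rw [hs2.readLE (ue.reg .rsp - 48) 8 (by u_omega) hoff8_t_rbx]
    exact srbx
  have t_f : UInt64.ofNat (s_109f59.mem.readLE (ue.reg .rsp - 128) 8) = ue.reg .rdx := by
    rw [hs2.readLE (ue.reg .rsp - 128) 8 (by u_omega) hoff8_t_f]
    exact sf
  have t_bt : s_109f59.mem.readLE (ue.reg .rsp - 132) 4 = inverse_mdct.bt ue := by
    rw [hs2.readLE (ue.reg .rsp - 132) 4 (by u_omega) hoff4_t_bt]
    exact sbt
  have t_save : s_109f59.mem.readLE (ue.reg .rsp - 152) 4 = A.T := by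
    rw [hs2.readLE (ue.reg .rsp - 152) 4 (by u_omega) hoff4_t_save]
    exact ssave
  have t_v : s_109f59.mem.readLE (ue.reg .rsp - 112) 8 = inverse_mdct.tmp A ue := by
    rw [hs2.readLE (ue.reg .rsp - 112) 8 (by u_omega) hoff8_t_v]
    exact sv
  have e_d0 : s_109f59.mem.readLE (ue.reg .rsp - 64) 8 = inverse_mdct.buf ue + 16 * t := by
    rw [hs2.readLE (ue.reg .rsp - 64) 8 (by u_omega) hoff8_e_d0]
    exact sd0
  have e_rbp : s_109f59.reg .rbp = ue.reg .rsp - 8 := by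
    rw [w_kept .rbp rfl]
    exact hrbp
  have hbody : inverse_mdct.Body u₀ others frames len A stored room ysz k c ue ret s_109f59 :=
    hb.carry hs w_eq habi e_rbp w_rsp t_ret t_rbp t_r15 t_r14 t_r13 t_r12 t_rbx t_f t_bt t_save t_v
  have e_rbx : (s_109f59.reg .rbx).toNat + 32 * t + 32 = inverse_mdct.tmp A ue + 2 * inverse_mdct.n ue := by
    rw [w_kept .rbx rfl]
    exact hrbx
  have e_r12 : (s_109f59.reg .r12).toNat + 32 * t + 32 = inverse_mdct.tabB ue + 2 * inverse_mdct.n ue := by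
    rw [w_kept .r12 rfl]
    exact hr12
  have e_r13 : (s_109f59.reg .r13).toNat + 16 * t + 16 = inverse_mdct.buf ue + 2 * inverse_mdct.n ue := by
    rw [w_kept .r13 rfl]
    exact hr13
  have e_r15 : (s_109f59.reg .r15).toNat = inverse_mdct.buf ue + 2 * inverse_mdct.n ue + 16 * t := by
    rw [w_kept .r15 rfl]
    exact hr15
  have e_r14 : (s_109f59.reg .r14).toNat + 16 * t + 16 = inverse_mdct.buf ue + 4 * inverse_mdct.n ue := by
    rw [w_kept .r14 rfl]
    exact hr14
  exact ReachVia.done ⟨w_rip, ⟨hbody, hloop.le, e_rbx, e_r12, e_d0, e_r13, e_r15, e_r14⟩, hlt⟩
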